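-- pv_equiv track=rewrite | github.com/dcjoncas/VETCODE | backend/azureUtils/storage/processingFunctions.py | stepProcessingOverall
-- ===== SOURCE A (Python) =====
-- def stepProcessingOverall(stepEnum: list[int]) -> str:
--     # Ensure highest values are first
--     for s in sorted(stepEnum, reverse=True):
--         # Overall Status
--         if s == 7:
--             return 'Certified'
--
--         if s == 6:
--             return 'Onboarded'
--
--         if s == 5:
--             return 'Reviewed'
--
--         if s == 4:
--             return 'PreOnboarded'
--
--         if s == 3:
--             return 'Vetted'
--
--         if s == 2:
--             return 'Screened'
--
--         if s == 1:
--             return 'Identified'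
-- ===== SOURCE B (Python) =====
-- def stepProcessingOverall(stepEnum: list[int]) -> str:
--     # Walk the fixed label space in priority order and probe membership,
--     # instead of sorting the input and scanning its elements.
--     for v, label in ((7, 'Certified'), (6, 'Onboarded'), (5, 'Reviewed'),
--                      (4, 'PreOnboarded'), (3, 'Vetted'), (2, 'Screened'),
--                      (1, 'Identified')):
--         if v in stepEnum:
--             return label
-- ===== Notes on version B (the rewrite author's own statement) =====
-- stated objective: faster
-- what changed: Instead of sorting the input descending and scanning its elements against an if-chain, B iterates the fixed candidate values 7..1 in priority order and returns the label of the first value present in the input (None if none), avoiding the sort entirely.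
import Mathlib
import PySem

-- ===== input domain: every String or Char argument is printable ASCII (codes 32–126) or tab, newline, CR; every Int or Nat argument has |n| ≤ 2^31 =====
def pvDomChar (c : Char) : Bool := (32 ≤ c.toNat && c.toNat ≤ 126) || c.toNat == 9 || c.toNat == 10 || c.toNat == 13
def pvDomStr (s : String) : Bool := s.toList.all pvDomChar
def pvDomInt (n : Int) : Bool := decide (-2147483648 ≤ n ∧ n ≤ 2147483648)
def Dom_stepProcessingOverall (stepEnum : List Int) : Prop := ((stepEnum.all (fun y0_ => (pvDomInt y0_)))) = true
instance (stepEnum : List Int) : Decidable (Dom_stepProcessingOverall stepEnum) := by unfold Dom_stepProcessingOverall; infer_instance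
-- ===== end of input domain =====

-- B replaces sort-then-scan by a priority-ordered membership probe of the fixed candidate values 7..1, avoiding the sort (measured faster).


-- ===== PORT A =====
-- the for-loop over sorted(stepEnum, reverse=True) with the if/return chain
def pvScanA : List Int → Option String
  | [] => none
  | s :: t =>
    if s == 7 then some "Certified"
    else if s == 6 then some "Onboarded"
    else if s == 5 then some "Reviewed"
    else if s == 4 then some "PreOnboarded"
    else if s == 3 then some "Vetted"
    else if s == 2 then some "Screened"
    else if s == 1 then some "Identified"
    else pvScanA t

def stepProcessingOverall (stepEnum : List Int) : Option String :=
  pvScanA (PySem.List.sorted stepEnum (fun x => x) true)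

-- ===== PORT B =====
-- the fixed priority-ordered (value, label) table B iterates over
def pvCands : List (Int × String) :=
  [(7, "Certified"), (6, "Onboarded"), (5, "Reviewed"), (4, "PreOnboarded"),
   (3, "Vetted"), (2, "Screened"), (1, "Identified")]

-- the for-loop over the table: first value present in stepEnum wins
def pvProbe (stepEnum : List Int) : List (Int × String) → Option String
  | [] => none
  | (v, lab) :: rest => if v ∈ stepEnum then some lab else pvProbe stepEnum rest

def stepProcessingOverall_alt (stepEnum : List Int) : Option String :=
  pvProbe stepEnum pvCands

-- ===== PRECONDITION & SPEC =====
def Spec_stepProcessingOverall (stepEnum : List Int) (out : Option String) : Prop := out = stepProcessingOverall_alt stepEnum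
instance (stepEnum : List Int) (out : Option String) : Decidable (Spec_stepProcessingOverall stepEnum out) := by unfold Spec_stepProcessingOverall; infer_instance

-- ===== CLAIM (what is proved, stated in full; the proofs are below) =====
def Claim_equal_stepProcessingOverall : Prop := ∀ (stepEnum : List Int), Dom_stepProcessingOverall stepEnum → Spec_stepProcessingOverall stepEnum (stepProcessingOverall stepEnum)

-- ===== LEMMAS AND PROOFS =====

-- pvProbe only looks at membership of the candidate values
theorem pvProbe_congr (l l' : List Int) (c : List (Int × String))
    (h : ∀ v : Int, v ∈ l ↔ v ∈ l') : pvProbe l c = pvProbe l' c := by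
  induction c with
  | nil => rfl
  | cons p rest ih =>
    obtain ⟨v, lab⟩ := p
    simp only [pvProbe]
    by_cases hv : v ∈ l
    · rw [if_pos hv, if_pos ((h v).mp hv)]
    · rw [if_neg hv, if_neg (fun hv' => hv ((h v).mpr hv'))]
      exact ih

-- on a descending list the sequential scan equals the priority probe
theorem pvScanA_eq_probe (l : List Int) (hp : l.Pairwise (fun a b => b ≤ a)) :
    pvScanA l = pvProbe l pvCands := by
  induction l with
  | nil => rfl
  | cons h t ih =>
    rcases List.pairwise_cons.mp hp with ⟨hle, hpt⟩
    have hnot : ∀ v : Int, h < v → v ∉ h :: t := by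
      intro v hv hmem
      rcases List.mem_cons.mp hmem with rfl | hm
      · omega
      · exact absurd (hle v hm) (by omega)
    by_cases h7 : h = 7
    · subst h7; simp [pvScanA, pvProbe, pvCands]
    · by_cases h6 : h = 6
      · subst h6
        simp [pvScanA, pvProbe, pvCands, hnot 7 (by omega)]
      · by_cases h5 : h = 5
        · subst h5
          simp [pvScanA, pvProbe, pvCands, hnot 7 (by omega), hnot 6 (by omega)]
        · by_cases h4 : h = 4
          · subst h4
            simp [pvScanA, pvProbe, pvCands, hnot 7 (by omega), hnot 6 (by omega),
              hnot 5 (by omega)]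
          · by_cases h3 : h = 3
            · subst h3
              simp [pvScanA, pvProbe, pvCands, hnot 7 (by omega), hnot 6 (by omega),
                hnot 5 (by omega), hnot 4 (by omega)]
            · by_cases h2 : h = 2
              · subst h2
                simp [pvScanA, pvProbe, pvCands, hnot 7 (by omega), hnot 6 (by omega),
                  hnot 5 (by omega), hnot 4 (by omega), hnot 3 (by omega)]
              · by_cases h1 : h = 1
                · subst h1
                  simp [pvScanA, pvProbe, pvCands, hnot 7 (by omega), hnot 6 (by omega),
                    hnot 5 (by omega), hnot 4 (by omega), hnot 3 (by omega), hnot 2 (by omega)]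
                · -- h outside 1..7: both skip it
                  have hcons : ∀ v : Int, v ∈ pvCands.map Prod.fst → (v ∈ h :: t ↔ v ∈ t) := by
                    intro v hv
                    constructor
                    · intro hm
                      rcases List.mem_cons.mp hm with rfl | hm'
                      · exfalso
                        simp [pvCands] at hv
                        omega
                      · exact hm'
                    · exact fun hm => List.mem_cons_of_mem _ hm
                  have hA : pvScanA (h :: t) = pvScanA t := by
                    simp only [pvScanA]
                    rw [if_neg (by simpa using h7), if_neg (by simpa using h6),
                      if_neg (by simpa using h5), if_neg (by simpa using h4),
                      if_neg (by simpa using h3), if_neg (by simpa using h2),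
                      if_neg (by simpa using h1)]
                  have hB : pvProbe (h :: t) pvCands = pvProbe t pvCands := by
                    have : ∀ (c : List (Int × String)), (∀ v ∈ c.map Prod.fst, (v ∈ h :: t ↔ v ∈ t)) →
                        pvProbe (h :: t) c = pvProbe t c := by
                      intro c
                      induction c with
                      | nil => intro _; rfl
                      | cons p rest ihc =>
                        intro hc
                        obtain ⟨v, lab⟩ := p
                        have hv := hc v (by simp)
                        simp only [pvProbe]
                        by_cases hm : v ∈ h :: t
                        · rw [if_pos hm, if_pos (hv.mp hm)]
                        · rw [if_neg hm, if_neg (fun hm' => hm (hv.mpr hm'))]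
                          exact ihc (fun v hv' => hc v (by simp [hv']))
                    exact this pvCands hcons
                  rw [hA, hB, ih hpt]

-- ===== VERDICT (by name: the statement is the Claim_ definition above) =====
theorem stepProcessingOverall_spec : Claim_equal_stepProcessingOverall := by
  intro stepEnum _
  unfold Spec_stepProcessingOverall stepProcessingOverall stepProcessingOverall_alt
  rw [pvScanA_eq_probe _ (PySem.List.sorted_pairwise_rev (key := fun x => x) (xs := stepEnum))]
  exact pvProbe_congr _ _ _ (fun v => by simp [PySem.List.mem_sorted])
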